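-- pv_equiv track=rewrite | github.com/russellmiller49/Procedure_suite | scripts/sanitize_dataset.py | get_entity_text
-- ===== SOURCE A (Python) =====
-- def get_entity_label(tag: str) -> str:
--     if not tag or tag == "O":
--         return "O"
--     if "-" in tag:
--         return tag.split("-", 1)[1]
--     return tag
--
-- def get_entity_text(tokens: list[str], tags: list[str], start_index: int) -> tuple[str, int]:
--     label = get_entity_label(tags[start_index])
--     idx = start_index
--     parts: list[str] = []
--     while idx < len(tokens):
--         tag = tags[idx]
--         if idx != start_index:
--             if not tag.startswith("I-") or get_entity_label(tag) != label:
--                 break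
--         token = tokens[idx]
--         if token.startswith("##"):
--             parts.append(token[2:])
--         else:
--             if parts:
--                 parts.append(" ")
--             parts.append(token)
--         idx += 1
--     return "".join(parts), idx
-- ===== SOURCE B (Python) =====
-- def get_entity_label(tag: str) -> str:
--     if not tag or tag == "O":
--         return "O"
--     if "-" in tag:
--         return tag.split("-", 1)[1]
--     return tag
--
-- def get_entity_text(tokens: list[str], tags: list[str], start_index: int) -> tuple[str, int]:
--     label = get_entity_label(tags[start_index])
--     end = start_index
--     while end < len(tokens) and (
--         end == start_index
--         or (tags[end].startswith("I-") and get_entity_label(tags[end]) == label)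
--     ):
--         end += 1
--     words: list[str] = []
--     for token in tokens[start_index:end]:
--         if token.startswith("##") and words:
--             words[-1] += token[2:]
--         else:
--             words.append(token[2:] if token.startswith("##") else token)
--     return " ".join(words), end
-- ===== Notes on version B (the rewrite author's own statement) =====
-- stated objective: alternative
-- what changed: B replaces A's single interleaved while-loop (which walks idx and grows a parts buffer with explicit space bookkeeping at the same time) by two sequential passes: first a scan over the tags to find the span end, then a reconstruction of the text from the slice tokens[start_index:end] by merging '##' word-pieces into the previous word and joining the words with ' '.join.
-- outside the precondition, e.g. on get_entity_text(['a'], ['B-X'], -1): A returns ('a', 0), B returns ('', 0); on get_entity_text(['a', 'b', 'c'], ['B-X', 'O'], 0): A returns ('a', 1), B returns ('a', 1)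
import Mathlib
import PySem

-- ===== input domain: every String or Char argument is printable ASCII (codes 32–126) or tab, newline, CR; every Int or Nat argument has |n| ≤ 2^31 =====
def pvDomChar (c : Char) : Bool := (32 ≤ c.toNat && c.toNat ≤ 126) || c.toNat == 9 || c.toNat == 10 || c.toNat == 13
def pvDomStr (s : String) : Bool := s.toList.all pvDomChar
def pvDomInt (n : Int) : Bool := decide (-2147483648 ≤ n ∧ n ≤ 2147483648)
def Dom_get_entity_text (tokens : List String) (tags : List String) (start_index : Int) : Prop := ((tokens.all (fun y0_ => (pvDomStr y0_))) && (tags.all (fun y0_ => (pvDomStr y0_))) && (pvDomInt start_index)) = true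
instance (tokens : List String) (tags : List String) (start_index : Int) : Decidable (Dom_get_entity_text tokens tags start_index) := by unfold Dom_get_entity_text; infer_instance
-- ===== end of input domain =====

-- B re-implements the same extraction as two sequential passes (find the span end, then join the
-- de-WordPieced words with " ".join) instead of A's single interleaved loop with a parts buffer;
-- objective: alternative decomposition, same asymptotic cost.

-- ===== PORT A =====
-- shared module helper get_entity_label (used verbatim by both Pythons)
def getEntityLabel (tag : String) : String :=
  if tag = "" ∨ tag = "O" then "O"
  else if PySem.Str.isIn "-" tag then
    -- tag.split("-", 1)[1]  ("-" ∈ tag, so the split has ≥ 2 pieces and the [1] never raises)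
    ((PySem.Str.splitMax? tag "-" 1).getD []).getD 1 ""
  else tag

-- A's while-loop: state (idx, parts), exit returns ("".join(parts), idx)
def geteLoopA (tokens : List String) (tags : List String) (start_index : Int) (label : String)
    (idx : Int) (parts : List String) : String × Int :=
  if _h : idx < (tokens.length : Int) then
    let tag := (PySem.List.pyGet? tags idx).getD ""   -- in range under Pre_
    if idx ≠ start_index ∧ (¬ PySem.Str.startswith tag "I-" ∨ getEntityLabel tag ≠ label) then
      (PySem.Str.join "" parts, idx)
    else
      let token := (PySem.List.pyGet? tokens idx).getD ""
      let parts' := if PySem.Str.startswith token "##" then parts ++ [PySem.Str.slice token (some 2) none]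
        else if parts ≠ [] then parts ++ [" ", token] else parts ++ [token]
      geteLoopA tokens tags start_index label (idx + 1) parts'
  else (PySem.Str.join "" parts, idx)
termination_by ((tokens.length : Int) - idx).toNat
decreasing_by omega

def get_entity_text (tokens : List String) (tags : List String) (start_index : Int) : String × Int :=
  let label := getEntityLabel ((PySem.List.pyGet? tags start_index).getD "")  -- in range under Pre_
  geteLoopA tokens tags start_index label start_index []

-- ===== PORT B =====
-- pass 1: advance end while the tag continues the entity
def geteFindEnd (tokens : List String) (tags : List String) (start_index : Int) (label : String)
    (e : Int) : Int :=
  if _h : e < (tokens.length : Int) ∧ (e = start_index ∨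
      (PySem.Str.startswith ((PySem.List.pyGet? tags e).getD "") "I-" ∧
       getEntityLabel ((PySem.List.pyGet? tags e).getD "") = label)) then
    geteFindEnd tokens tags start_index label (e + 1)
  else e
termination_by ((tokens.length : Int) - e).toNat
decreasing_by omega

-- pass 2: merge "##" pieces into the previous word, collect words
def geteWords : List String → List String → List String
  | [], ws => ws
  | t :: rest, ws =>
    if PySem.Str.startswith t "##" ∧ ws ≠ [] then
      geteWords rest (ws.dropLast ++ [ws.getLast! ++ PySem.Str.slice t (some 2) none])
    else
      geteWords rest (ws ++ [if PySem.Str.startswith t "##" then PySem.Str.slice t (some 2) none else t])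

def get_entity_text_alt (tokens : List String) (tags : List String) (start_index : Int) : String × Int :=
  let label := getEntityLabel ((PySem.List.pyGet? tags start_index).getD "")  -- in range under Pre_
  let e := geteFindEnd tokens tags start_index label start_index
  (PySem.Str.join " " (geteWords (PySem.List.slice tokens (some start_index) (some e)) []), e)

-- ===== PRECONDITION & SPEC =====
-- Pre_ excludes negative start_index (where A returns only by Python's negative-index wraparound)
-- and tag lists shorter than the token list or not covering start_index (where A's inner
-- tags[idx] access raises IndexError unless the scan happens to break first).
def Pre_get_entity_text (tokens : List String) (tags : List String) (start_index : Int) : Prop :=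
  0 ≤ start_index ∧ start_index < (tags.length : Int) ∧ tokens.length ≤ tags.length
instance (tokens : List String) (tags : List String) (start_index : Int) : Decidable (Pre_get_entity_text tokens tags start_index) := by unfold Pre_get_entity_text; infer_instance

def pvWitness_get_entity_text : List String × List String × Int :=
  (["Right", "lower", "##lobe", "mass"], ["B-ANAT", "I-ANAT", "I-ANAT", "O"], 0)

def Spec_get_entity_text (tokens : List String) (tags : List String) (start_index : Int) (out : String × Int) : Prop := out = get_entity_text_alt tokens tags start_index
instance (tokens : List String) (tags : List String) (start_index : Int) (out : String × Int) : Decidable (Spec_get_entity_text tokens tags start_index out) := by unfold Spec_get_entity_text; infer_instance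

-- ===== CLAIM (what is proved, stated in full; the proofs are below) =====
def Claim_equal_get_entity_text : Prop := ∀ (tokens : List String) (tags : List String) (start_index : Int), Dom_get_entity_text tokens tags start_index → Pre_get_entity_text tokens tags start_index → Spec_get_entity_text tokens tags start_index (get_entity_text tokens tags start_index)

-- ===== LEMMAS AND PROOFS =====

-- the tokens of the entity span starting at idx (continuation condition = B's, = ¬A's break)
def geteSpan (tokens : List String) (tags : List String) (start_index : Int) (label : String)
    (idx : Int) : List String :=
  if _h : idx < (tokens.length : Int) ∧ (idx = start_index ∨
      (PySem.Str.startswith ((PySem.List.pyGet? tags idx).getD "") "I-" ∧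
       getEntityLabel ((PySem.List.pyGet? tags idx).getD "") = label)) then
    (PySem.List.pyGet? tokens idx).getD "" :: geteSpan tokens tags start_index label (idx + 1)
  else []
termination_by ((tokens.length : Int) - idx).toNat
decreasing_by omega

-- the text of a token list, given whether something precedes it
def geteText : List String → Bool → String
  | [], _ => ""
  | t :: ts, pre =>
    (if PySem.Str.startswith t "##" then PySem.Str.slice t (some 2) none
     else if pre then " " ++ t else t) ++ geteText ts true

theorem gete_join_nil (sep : String) : PySem.Str.join sep [] = "" := by
  apply String.toList_inj.mp
  simp [PySem.Str.join, PySem.Chars.join, List.intercalate]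

theorem gete_join_singleton (sep a : String) : PySem.Str.join sep [a] = a := by
  apply String.toList_inj.mp
  simp [PySem.Str.join, PySem.Chars.join, List.intercalate]

theorem gete_join_cons_ne (sep a : String) (l : List String) (h : l ≠ []) :
    PySem.Str.join sep (a :: l) = a ++ sep ++ PySem.Str.join sep l := by
  obtain ⟨b, t, rfl⟩ := List.exists_cons_of_ne_nil h
  apply String.toList_inj.mp
  simp [PySem.Str.join, PySem.Chars.join, List.intercalate, String.toList_append]

theorem gete_join_nil_append (a : List String) (x : String) :
    PySem.Str.join "" (a ++ [x]) = PySem.Str.join "" a ++ x := by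
  induction a with
  | nil => simp [gete_join_singleton, gete_join_nil]
  | cons h t ih =>
    rw [List.cons_append, gete_join_cons_ne _ _ _ (by simp)]
    cases t with
    | nil =>
      simp [gete_join_singleton, String.append_empty]
    | cons b t2 =>
      rw [ih, gete_join_cons_ne "" h (b :: t2) (by simp)]
      simp [String.append_assoc, String.append_empty]

theorem gete_join_sp_append (ws : List String) (x : String) :
    PySem.Str.join " " (ws ++ [x]) =
      (if ws = [] then x else PySem.Str.join " " ws ++ " " ++ x) := by
  induction ws with
  | nil => simp [gete_join_singleton]
  | cons h t ih =>
    rw [List.cons_append, gete_join_cons_ne _ _ _ (by simp), ih]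
    cases t with
    | nil => simp [gete_join_singleton]
    | cons b t2 =>
      rw [gete_join_cons_ne " " h (b :: t2) (by simp)]
      simp [String.append_assoc]

theorem gete_join_sp_extend (ws : List String) (s : String) (h : ws ≠ []) :
    PySem.Str.join " " (ws.dropLast ++ [ws.getLast! ++ s]) =
      PySem.Str.join " " ws ++ s := by
  induction ws with
  | nil => exact absurd rfl h
  | cons a t ih =>
    cases t with
    | nil => simp [gete_join_singleton]
    | cons b t2 =>
      have hne : (b :: t2).dropLast ++ [(b :: t2).getLast! ++ s] ≠ [] := by simp
      have hgl : (a :: b :: t2).getLast! = (b :: t2).getLast! := rfl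
      rw [List.dropLast_cons_of_ne_nil (by simp), hgl,
        List.cons_append, gete_join_cons_ne _ _ _ hne, ih (by simp),
        gete_join_cons_ne " " a (b :: t2) (by simp)]
      simp [String.append_assoc]

theorem gete_findEnd_eq (tokens tags : List String) (start_index : Int) (label : String)
    (idx : Int) :
    geteFindEnd tokens tags start_index label idx =
      idx + ((geteSpan tokens tags start_index label idx).length : Int) := by
  fun_induction geteFindEnd tokens tags start_index label idx with
  | case1 e h ih =>
    rw [geteSpan, dif_pos h, ih]
    simp only [List.length_cons]
    push_cast
    omega
  | case2 e h =>
    rw [geteSpan, dif_neg h]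
    simp

theorem gete_loopA_eq (tokens tags : List String) (start_index : Int) (label : String)
    (idx : Int) (parts : List String) :
    geteLoopA tokens tags start_index label idx parts =
      (PySem.Str.join "" parts ++
        geteText (geteSpan tokens tags start_index label idx) (decide (parts ≠ [])),
       idx + ((geteSpan tokens tags start_index label idx).length : Int)) := by
  fun_induction geteLoopA tokens tags start_index label idx parts with
  | case1 i ps h tg hbrk =>
    have hs : ¬ (i < (tokens.length : Int) ∧ (i = start_index ∨
        (PySem.Str.startswith ((PySem.List.pyGet? tags i).getD "") "I-" ∧
         getEntityLabel ((PySem.List.pyGet? tags i).getD "") = label))) := by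
      rintro ⟨-, hc⟩
      rcases hc with rfl | ⟨hsw, hlab⟩
      · exact hbrk.1 rfl
      · rcases hbrk.2 with hnsw | hnlab
        · exact hnsw hsw
        · exact hnlab hlab
    rw [geteSpan, dif_neg hs]
    simp [geteText, String.append_empty]
  | case2 i ps h tg hbrk tok ps2 ih =>
    push Not at hbrk
    have hs : i < (tokens.length : Int) ∧ (i = start_index ∨
        (PySem.Str.startswith ((PySem.List.pyGet? tags i).getD "") "I-" ∧
         getEntityLabel ((PySem.List.pyGet? tags i).getD "") = label)) := by
      refine ⟨h, ?_⟩
      by_cases he : i = start_index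
      · exact Or.inl he
      · exact Or.inr (hbrk he)
    rw [geteSpan, dif_pos hs, ih]
    have hps2 : ps2 ≠ [] := by
      simp only [ps2]
      split
      · simp
      · split <;> simp
    refine Prod.ext ?_ ?_
    · simp only [hps2, ne_eq, not_false_iff, decide_true]
      rw [geteText]
      by_cases hsw : PySem.Str.startswith tok "##" = true
      · have e2 : ps2 = ps ++ [PySem.Str.slice tok (some 2) none] := by
          simp only [ps2, dif_pos hsw]
        rw [e2, gete_join_nil_append, if_pos hsw, String.append_assoc]
      · by_cases hne : ps ≠ []
        · have e2 : ps2 = (ps ++ [" "]) ++ [tok] := by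
            simp only [ps2, dif_neg hsw, dif_pos hne]
            simp
          rw [e2, gete_join_nil_append, gete_join_nil_append, if_neg hsw]
          simp only [tok]
          simp [hne, String.append_assoc]
        · have e2 : ps2 = ps ++ [tok] := by
            simp only [ps2, dif_neg hsw, dif_neg hne]
          rw [e2, gete_join_nil_append, if_neg hsw]
          simp only [ne_eq, not_not] at hne
          simp only [tok]
          simp [hne, gete_join_nil, String.empty_append]
    · simp only [List.length_cons]
      push_cast
      omega
  | case3 i ps h =>
    have hs : ¬ (i < (tokens.length : Int) ∧ (i = start_index ∨
        (PySem.Str.startswith ((PySem.List.pyGet? tags i).getD "") "I-" ∧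
         getEntityLabel ((PySem.List.pyGet? tags i).getD "") = label))) := fun hc => h hc.1
    rw [geteSpan, dif_neg hs]
    simp [geteText, String.append_empty]

theorem gete_words_eq (L ws : List String) :
    PySem.Str.join " " (geteWords L ws) =
      PySem.Str.join " " ws ++ geteText L (decide (ws ≠ [])) := by
  induction L generalizing ws with
  | nil => simp [geteWords, geteText, String.append_empty]
  | cons t rest ih =>
    rw [geteWords, geteText]
    by_cases hc : PySem.Str.startswith t "##" ∧ ws ≠ []
    · rw [if_pos hc, ih]
      have h1 : (ws.dropLast ++ [ws.getLast! ++ PySem.Str.slice t (some 2) none]) ≠ [] := by simp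
      simp only [h1, ne_eq, not_false_iff, decide_true]
      rw [gete_join_sp_extend ws _ hc.2, if_pos hc.1]
      simp [String.append_assoc]
    · rw [if_neg hc, ih]
      have h1 : ws ++ [if PySem.Str.startswith t "##" then PySem.Str.slice t (some 2) none else t] ≠ [] := by simp
      simp only [h1, ne_eq, not_false_iff, decide_true]
      rw [gete_join_sp_append]
      by_cases hws : ws = []
      · subst hws
        simp [gete_join_nil, String.empty_append]
      · have hsw : ¬ PySem.Str.startswith t "##" = true := fun hswt => hc ⟨hswt, hws⟩
        rw [if_neg hws]
        simp only [PySem.Str.startswith_eq, show "##".toList = ['#', '#'] from rfl] at hsw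
        simp [hsw, hws, String.append_assoc]

theorem gete_span_drop_take (tokens tags : List String) (start_index : Int) (label : String)
    (idx : Int) :
    0 ≤ idx →
    (tokens.drop idx.toNat).take (geteSpan tokens tags start_index label idx).length =
      geteSpan tokens tags start_index label idx := by
  fun_induction geteSpan tokens tags start_index label idx with
  | case1 i h ih =>
    intro h0
    have hlen : i < (tokens.length : Int) := h.1
    have hlt : i.toNat < tokens.length := by omega
    have hget : (PySem.List.pyGet? tokens i).getD "" = tokens[i.toNat] := by
      rw [show (PySem.List.pyGet? tokens i).getD "" = PySem.List.pyGetD tokens i "" from rfl,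
        PySem.List.pyGetD_eq_getElem tokens "" h0 hlen]
    have ht : (i + 1).toNat = i.toNat + 1 := by omega
    rw [ht] at ih
    rw [List.length_cons, List.drop_eq_getElem_cons hlt, List.take_succ_cons, ih (by omega), hget]
  | case2 i h =>
    intro _
    simp

theorem gete_span_slice (tokens tags : List String) (start_index : Int) (label : String)
    (idx : Int) (h0 : 0 ≤ idx) :
    geteSpan tokens tags start_index label idx =
      PySem.List.slice tokens (some idx)
        (some (idx + ((geteSpan tokens tags start_index label idx).length : Int))) := by
  rw [PySem.List.slice_toNat tokens h0 (by omega)]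
  have hlen : (idx + ((geteSpan tokens tags start_index label idx).length : Int)).toNat - idx.toNat
      = (geteSpan tokens tags start_index label idx).length := by omega
  rw [hlen, gete_span_drop_take tokens tags start_index label idx h0]

-- ===== VERDICT (by name: the statement is the Claim_ definition above) =====
theorem get_entity_text_spec : Claim_equal_get_entity_text := by
  intro tokens tags start_index _hdom hpre
  unfold Spec_get_entity_text get_entity_text get_entity_text_alt
  simp only [gete_loopA_eq, gete_findEnd_eq]
  rw [← gete_span_slice tokens tags start_index _ start_index hpre.1, gete_words_eq]
  simp
  decide
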